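-- pv_equiv track=rewrite | github.com/KazanCn/cppcheck | tools/matchcompiler.py | _parseStringComparison
-- ===== SOURCE A (Python) =====
-- def _parseStringComparison(line, pos1):
--     startPos = 0
--     endPos = 0
--     pos = pos1
--     inString = False
--     while pos < len(line):
--         if inString:
--             if line[pos] == '\\':
--                 pos += 1
--             elif line[pos] == '"':
--                 inString = False
--                 endPos = pos+1
--                 return (startPos, endPos)
--         elif line[pos] == '"':
--             startPos = pos
--             inString = True
--         pos += 1
--
--     return None
-- ===== SOURCE B (Python) =====
-- def _parseStringComparison(line, pos1):
--     # find the opening quote, then jump between candidate closing quotes with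
--     # str.find, accepting one that is preceded by an even number of backslashes
--     start = line.find('"', pos1)
--     if start == -1:
--         return None
--     k = start
--     while True:
--         k = line.find('"', k + 1)
--         if k == -1:
--             return None
--         b = k - 1
--         while b > start and line[b] == '\\':
--             b -= 1
--         if (k - 1 - b) % 2 == 0:
--             return (start, k + 1)
-- ===== Notes on version B (the rewrite author's own statement) =====
-- stated objective: alternative
-- what changed: B replaces A's per-character in/out-of-string state machine by str.find-based jumps: find the opening quote, then repeatedly find the next quote candidate and accept it when the run of backslashes immediately before it has even length.
-- outside the precondition, e.g. on _parseStringComparison('"x"', -3): A returns (-3, 0), B returns (0, 3)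
import Mathlib
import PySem

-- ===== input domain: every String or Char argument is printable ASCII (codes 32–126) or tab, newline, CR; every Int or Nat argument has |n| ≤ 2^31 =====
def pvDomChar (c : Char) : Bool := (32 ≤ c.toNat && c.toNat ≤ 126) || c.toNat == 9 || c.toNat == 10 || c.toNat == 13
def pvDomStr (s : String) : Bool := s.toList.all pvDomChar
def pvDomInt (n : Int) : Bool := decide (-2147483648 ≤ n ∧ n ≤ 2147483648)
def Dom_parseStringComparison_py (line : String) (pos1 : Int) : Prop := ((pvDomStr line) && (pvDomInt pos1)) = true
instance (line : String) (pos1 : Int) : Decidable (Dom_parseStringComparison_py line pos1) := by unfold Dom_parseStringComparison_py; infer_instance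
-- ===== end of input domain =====

-- B replaces A's per-character state machine with str.find-based jumps plus a
-- backslash-run parity test (objective: alternative algorithm, same asymptotic cost).

-- ===== PORT A =====
-- the while loop of _parseStringComparison; pos advances by 1 (by 2 over an escape)
def pvALoop (cs : List Char) (startPos pos : Int) (inString : Bool) : Option (Int × Int) :=
  if _h : pos < (cs.length : Int) then
    match PySem.List.pyGet? cs pos with
    | none => none   -- line[pos] raises IndexError (only for pos < -len; outside Pre_)
    | some c =>
      if inString then
        if c = '\\' then pvALoop cs startPos (pos + 1 + 1) true
        else if c = '"' then some (startPos, pos + 1)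
        else pvALoop cs startPos (pos + 1) true
      else if c = '"' then pvALoop cs pos (pos + 1) true
      else pvALoop cs startPos (pos + 1) false
  else none
termination_by ((cs.length : Int) - pos).toNat
decreasing_by all_goals omega

def parseStringComparison_py (line : String) (pos1 : Int) : Option (Int × Int) :=
  pvALoop line.toList 0 pos1 false

-- ===== PORT B =====
-- Source B's inner while: step b back over backslashes while b > start (fuel only
-- makes the recursion structural; b moves left each step, cs.length suffices)
def pvCountBack (cs : List Char) (start : Int) : Int → Nat → Int
  | b, 0 => b
  | b, fuel + 1 =>
    if start < b ∧ PySem.List.pyGet? cs b = some '\\' then pvCountBack cs start (b - 1) fuel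
    else b

-- Source B's outer while True loop; fuel only makes the recursion total (each
-- iteration moves k strictly right, so cs.length iterations always suffice)
def pvBLoop (cs : List Char) (start : Int) (k : Int) : Nat → Option (Int × Int)
  | 0 => none
  | fuel + 1 =>
    let k' := PySem.Chars.findFrom cs ['"'] (k + 1) none
    if k' = -1 then none
    else
      let b := pvCountBack cs start (k' - 1) cs.length
      if PySem.Int.mod (k' - 1 - b) 2 = 0 then some (start, k' + 1)
      else pvBLoop cs start k' fuel

def parseStringComparison_py_alt (line : String) (pos1 : Int) : Option (Int × Int) :=
  let cs := line.toList
  let start := PySem.Chars.findFrom cs ['"'] pos1 none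
  if start = -1 then none
  else pvBLoop cs start start cs.length

-- ===== PRECONDITION & SPEC =====
-- Pre_ excludes negative pos1, outside the natural domain of a scan position:
-- there A either raises IndexError (pos1 < -len) or returns spans computed via
-- Python's negative-index wraparound (e.g. (-3, 0)).
def Pre_parseStringComparison_py (_line : String) (pos1 : Int) : Prop := 0 ≤ pos1
instance (line : String) (pos1 : Int) : Decidable (Pre_parseStringComparison_py line pos1) := by
  unfold Pre_parseStringComparison_py; infer_instance

def pvWitness_parseStringComparison_py : String × Int := ("\"a\"", 0)

def Spec_parseStringComparison_py (line : String) (pos1 : Int) (out : Option (Int × Int)) : Prop :=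
  out = parseStringComparison_py_alt line pos1
instance (line : String) (pos1 : Int) (out : Option (Int × Int)) : Decidable (Spec_parseStringComparison_py line pos1 out) := by
  unfold Spec_parseStringComparison_py; infer_instance

-- ===== CLAIM (what is proved, stated in full; the proofs are below) =====
def Claim_equal_parseStringComparison_py : Prop := ∀ (line : String) (pos1 : Int), Dom_parseStringComparison_py line pos1 → Pre_parseStringComparison_py line pos1 → Spec_parseStringComparison_py line pos1 (parseStringComparison_py line pos1)

-- ===== LEMMAS AND PROOFS =====

theorem pv_findFrom_of_gt (s sub : List Char) (st : Int) (h : (s.length : Int) < st) :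
    PySem.Chars.findFrom s sub st none = -1 := by
  simp only [PySem.Chars.findFrom]
  rw [if_pos (by omega)]

theorem pv_singleton_prefix (l : List Char) (c : Char) : [c] <+: l ↔ l.head? = some c := by
  cases l with
  | nil => simp
  | cons a as => simp [List.cons_prefix_cons, eq_comm]

theorem pv_prefix_drop_iff (cs : List Char) (c : Char) (i : Nat) :
    [c] <+: cs.drop i ↔ cs[i]? = some c := by
  rw [pv_singleton_prefix, List.head?_drop]

theorem pv_noq_true (cs : List Char) (s : Int) (p : Nat)
    (h : ∀ i : Nat, p ≤ i → cs[i]? ≠ some '"') :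
    pvALoop cs s (p : Int) true = none := by
  rw [pvALoop.eq_def]
  split
  · next hlt =>
    have hp : p < cs.length := by exact_mod_cast hlt
    have hget : PySem.List.pyGet? cs (p : Int) = some cs[p] := by
      simp [List.getElem?_eq_getElem hp]
    rw [hget]
    have hne : cs[p] ≠ '"' := by
      intro hc; exact h p le_rfl (by simp [List.getElem?_eq_getElem hp, hc])
    simp only [if_pos rfl]
    by_cases hb : cs[p] = '\\'
    · rw [if_pos hb]
      have : ((p : Int) + 1 + 1) = ((p + 2 : Nat) : Int) := by push_cast; ring
      rw [this]
      exact pv_noq_true cs s (p + 2) (fun i hi => h i (by omega))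
    · rw [if_neg hb, if_neg hne]
      have : ((p : Int) + 1) = ((p + 1 : Nat) : Int) := by push_cast; ring
      rw [this]
      exact pv_noq_true cs s (p + 1) (fun i hi => h i (by omega))
  · rfl
termination_by cs.length - p
decreasing_by all_goals omega

theorem pv_noq_false (cs : List Char) (s : Int) (p : Nat)
    (h : ∀ i : Nat, p ≤ i → cs[i]? ≠ some '"') :
    pvALoop cs s (p : Int) false = none := by
  rw [pvALoop.eq_def]
  split
  · next hlt =>
    have hp : p < cs.length := by exact_mod_cast hlt
    have hget : PySem.List.pyGet? cs (p : Int) = some cs[p] := by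
      simp [List.getElem?_eq_getElem hp]
    rw [hget]
    have hne : cs[p] ≠ '"' := by
      intro hc; exact h p le_rfl (by simp [List.getElem?_eq_getElem hp, hc])
    simp only [Bool.false_eq_true, if_false, if_neg hne]
    have : ((p : Int) + 1) = ((p + 1 : Nat) : Int) := by push_cast; ring
    rw [this]
    exact pv_noq_false cs s (p + 1) (fun i hi => h i (by omega))
  · rfl
termination_by cs.length - p
decreasing_by all_goals omega

theorem pv_walk_false (cs : List Char) (s : Int) (p r : Nat)
    (hpr : p ≤ r) (hq : cs[r]? = some '"')
    (hmin : ∀ i : Nat, p ≤ i → i < r → cs[i]? ≠ some '"') :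
    pvALoop cs s (p : Int) false = pvALoop cs (r : Int) ((r : Int) + 1) true := by
  have hr : r < cs.length := by
    have := List.getElem?_eq_some_iff.mp hq; exact this.1
  rw [pvALoop.eq_def]
  have hp : p < cs.length := by omega
  have hlt : (p : Int) < (cs.length : Int) := by exact_mod_cast hp
  rw [dif_pos hlt]
  have hget : PySem.List.pyGet? cs (p : Int) = some cs[p] := by
    simp [List.getElem?_eq_getElem hp]
  rw [hget]
  rcases eq_or_lt_of_le hpr with heq | hlt2
  · subst heq
    have : cs[p] = '"' := by
      have := List.getElem?_eq_getElem hp ▸ hq; exact Option.some_injective _ this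
    simp only [Bool.false_eq_true, if_false, if_pos this]
  · have hne : cs[p] ≠ '"' := by
      intro hc; exact hmin p le_rfl hlt2 (by simp [List.getElem?_eq_getElem hp, hc])
    simp only [Bool.false_eq_true, if_false, if_neg hne]
    have : ((p : Int) + 1) = ((p + 1 : Nat) : Int) := by push_cast; ring
    rw [this]
    exact pv_walk_false cs s (p + 1) r (by omega) hq (fun i hi => hmin i (by omega))
termination_by r - p
decreasing_by all_goals omega

theorem pv_countBack_spec (cs : List Char) (s k e : Nat)
    (hsk : s ≤ k) (hke : k ≤ e) (hq : cs[k]? = some '"') :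
    ∃ t : Nat, k < t ∧ t ≤ e + 1 ∧
      (∀ fuel : Nat, e ≤ k + fuel → pvCountBack cs (s : Int) (e : Int) fuel = (t : Int) - 1) ∧
      (∀ i : Nat, t ≤ i → i ≤ e → cs[i]? = some '\\') ∧
      (t = k + 1 ∨ cs[t-1]? ≠ some '\\') := by
  by_cases hstop : e = k ∨ cs[e]? ≠ some '\\'
  · refine ⟨e + 1, by omega, by omega, ?_, ?_, ?_⟩
    · intro fuel hfuel
      cases fuel with
      | zero => simp [pvCountBack]
      | succ m =>
        rw [pvCountBack, if_neg]
        · push_cast; ring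
        · rintro ⟨h1, h2⟩
          rcases hstop with he | hne
          · have hq' : cs[e]? = some '"' := he ▸ hq
            have : PySem.List.pyGet? cs (e : Int) = some '"' := by
              simpa [PySem.List.pyGet?_natCast] using hq'
            rw [this] at h2; simp at h2
          · apply hne
            simpa [PySem.List.pyGet?_natCast] using h2
    · intro i h1 h2; exact (Nat.lt_irrefl e (by omega)).elim
    · rcases hstop with he | hne
      · left; omega
      · right; simpa using hne
  · push_neg at hstop
    obtain ⟨hek, hbs⟩ := hstop
    have hek' : k < e := by omega
    obtain ⟨t, ht1, ht2, ht3, ht4, ht5⟩ :=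
      pv_countBack_spec cs s k (e - 1) hsk (by omega) hq
    refine ⟨t, ht1, by omega, ?_, ?_, ht5⟩
    · intro fuel hfuel
      cases fuel with
      | zero => omega
      | succ m =>
        rw [pvCountBack, if_pos]
        · have : (e : Int) - 1 = ((e - 1 : Nat) : Int) := by omega
          rw [this]
          exact ht3 m (by omega)
        · exact ⟨by omega, by rw [PySem.List.pyGet?_natCast]; simpa using hbs⟩
    · intro i hti hie
      rcases eq_or_lt_of_le hie with he | hlt
      · subst he; simpa using hbs
      · exact ht4 i hti (by omega)
termination_by e - k
decreasing_by all_goals omega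

theorem pv_run (cs : List Char) (s : Int) (K : Nat) (hK : K < cs.length)
    (hqK : cs[K]? = some '"') (q t : Nat) (hqt : q ≤ t) (htK : t ≤ K)
    (hnq : ∀ i : Nat, q ≤ i → i < K → cs[i]? ≠ some '"')
    (hrun : ∀ i : Nat, t ≤ i → i < K → cs[i]? = some '\\')
    (hstart : t = q ∨ cs[t-1]? ≠ some '\\') :
    pvALoop cs s (q : Int) true =
      (if (K - t) % 2 = 0 then some (s, (K : Int) + 1) else pvALoop cs s ((K : Int) + 1) true) := by
  rcases eq_or_lt_of_le (hqt.trans htK) with hqK' | hqlt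
  · -- q = K, hence t = K: the walk sits on the closing quote
    have htq : t = K := by omega
    rw [htq, Nat.sub_self]
    rw [if_pos (by norm_num)]
    rw [pvALoop.eq_def]
    rw [dif_pos (by exact_mod_cast (hqK' ▸ hK : q < cs.length))]
    have hget : PySem.List.pyGet? cs (q : Int) = some '"' := by
      rw [PySem.List.pyGet?_natCast, hqK', hqK]
    rw [hget]
    norm_num [hqK']
    intro hcon
    exact absurd hcon (by decide)
  · -- q < K
    have hq : q < cs.length := by omega
    have hget : PySem.List.pyGet? cs (q : Int) = some cs[q] := by
      simp [List.getElem?_eq_getElem hq]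
    have hne : cs[q] ≠ '"' := by
      intro hc; exact hnq q le_rfl hqlt (by simp [List.getElem?_eq_getElem hq, hc])
    rw [pvALoop.eq_def]
    rw [dif_pos (by exact_mod_cast hq)]
    rw [hget]
    simp only [if_pos rfl, if_neg hne]
    by_cases hbq : cs[q] = '\\'
    · rw [if_pos hbq]
      have hcast2 : ((q : Int) + 1 + 1) = ((q + 2 : Nat) : Int) := by push_cast; ring
      rw [hcast2]
      rcases eq_or_lt_of_le hqt with hqt' | hqlt2
    -- q = t : inside (at the start of) the backslash run
      · by_cases hq2 : q + 2 ≤ K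
        · have hpar : (K - (q + 2)) % 2 = (K - t) % 2 := by omega
          rw [← hpar]
          exact pv_run cs s K hK hqK (q+2) (q+2) le_rfl (by omega)
            (fun i h1 h2 => hnq i (by omega) h2)
            (fun i h1 h2 => hrun i (by omega) h2)
            (Or.inl rfl)
        · -- q = K - 1: lone trailing backslash escapes the quote; walk jumps past it
          have hqK1 : q + 1 = K := by omega
          have hodd : (K - t) % 2 = 1 := by omega
          rw [hodd]
          norm_num
          congr 1
          omega
      · -- q < t : before the run; the char is an (escaping) backslash with q+2 ≤ t
        have ht2 : q + 2 ≤ t := by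
          rcases hstart with h | h
          · omega
          · by_contra hcon
            have : t - 1 = q := by omega
            exact h (this ▸ (by simp [List.getElem?_eq_getElem hq, hbq]))
        exact pv_run cs s K hK hqK (q+2) t ht2 htK
          (fun i h1 h2 => hnq i (by omega) h2) hrun
          (by rcases hstart with h | h; exacts [absurd h (by omega), Or.inr h])
    · rw [if_neg hbq]
      have hcast1 : ((q : Int) + 1) = ((q + 1 : Nat) : Int) := by push_cast; ring
      rw [hcast1]
      have hqt2 : q < t := by
        rcases eq_or_lt_of_le hqt with h | h
        · exfalso
          exact hbq (by
            have := hrun q (by omega) hqlt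
            have := (List.getElem?_eq_getElem hq) ▸ this
            exact Option.some_injective _ this)
        · exact h
      exact pv_run cs s K hK hqK (q+1) t (by omega) htK
        (fun i h1 h2 => hnq i (by omega) h2) hrun
        (by rcases hstart with h | h; exacts [Or.inl (by omega), Or.inr h])
termination_by K - q
decreasing_by all_goals omega

theorem pv_no_quote_of_not_infix (cs : List Char) (p : Nat)
    (h : ¬ ['"'] <:+: cs.drop p) : ∀ i : Nat, p ≤ i → cs[i]? ≠ some '"' := by
  intro i hpi hc
  apply h
  have hpre : ['"'] <+: (cs.drop p).drop (i - p) := by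
    rw [List.drop_drop]
    rw [pv_prefix_drop_iff, show p + (i - p) = i by omega]
    exact hc
  rw [← PySem.Chars.isIn_iff_infix]
  rw [← PySem.Chars.exists_prefix_drop_iff_isIn]
  exact ⟨i - p, hpre⟩

theorem pv_core (cs : List Char) (s : Nat) :
    ∀ (fuel k : Nat), cs[k]? = some '"' → s ≤ k → cs.length ≤ k + fuel →
    pvALoop cs (s : Int) ((k : Int) + 1) true = pvBLoop cs (s : Int) (k : Int) fuel := by
  intro fuel
  induction fuel with
  | zero =>
    intro k hq _ hfuel
    have : k < cs.length := (List.getElem?_eq_some_iff.mp hq).1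
    omega
  | succ fuel ih =>
    intro k hq hsk hfuel
    have hk : k < cs.length := (List.getElem?_eq_some_iff.mp hq).1
    have hk1 : k + 1 ≤ cs.length := hk
    have hcast : ((k : Int) + 1) = ((k + 1 : Nat) : Int) := by push_cast; ring
    simp only [pvBLoop]
    rw [hcast]
    by_cases hk' : PySem.Chars.findFrom cs ['"'] ((k + 1 : Nat) : Int) none = -1
    · rw [if_pos hk']
      have hnoq := pv_no_quote_of_not_infix cs (k + 1)
        ((PySem.Chars.findFrom_natCast_eq_neg_one_iff cs ['"'] (k+1) hk1).mp hk')
      exact pv_noq_true cs s (k + 1) hnoq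
    · rw [if_neg hk']
      obtain ⟨hle, hpre, hmin⟩ :=
        PySem.Chars.findFrom_natCast_spec cs ['"'] (k+1) hk1 hk'
      set k' := PySem.Chars.findFrom cs ['"'] ((k + 1 : Nat) : Int) none with hk'def
      have hknn : 0 ≤ k' := le_trans (by positivity) hle
      set K := k'.toNat with hKdef
      have hkK : (k' : Int) = (K : Int) := by omega
      have hqK : cs[K]? = some '"' := (pv_prefix_drop_iff cs '"' K).mp hpre
      have hKn : K < cs.length := (List.getElem?_eq_some_iff.mp hqK).1
      have hkK1 : k + 1 ≤ K := by omega
      have hminq : ∀ i : Nat, k + 1 ≤ i → i < K → cs[i]? ≠ some '"' := by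
        intro i h1 h2 hc
        exact hmin i h1 h2 ((pv_prefix_drop_iff cs '"' i).mpr hc)
      obtain ⟨t, ht1, ht2, ht3, ht4, ht5⟩ :=
        pv_countBack_spec cs s k (K - 1) hsk (by omega) hq
      have hbeq : pvCountBack cs (s : Int) (k' - 1) cs.length = (t : Int) - 1 := by
        rw [show k' - 1 = ((K - 1 : Nat) : Int) by omega]
        exact ht3 cs.length (by omega)
      rw [hbeq]
      have hpar : PySem.Int.mod (k' - 1 - ((t : Int) - 1)) 2 = (((K - t) % 2 : Nat) : Int) := by
        rw [show k' - 1 - ((t : Int) - 1) = ((K - t : Nat) : Int) by omega]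
        exact PySem.Int.mod_natCast (K - t) 2
      have hrun := pv_run cs (s : Int) K hKn hqK (k+1) t (by omega) (by omega)
        hminq (fun i h1 h2 => ht4 i h1 (by omega))
        (by rcases ht5 with h | h; exacts [Or.inl (by omega), Or.inr h])
      rw [hrun, hpar]
      by_cases hev : (K - t) % 2 = 0
      · rw [if_pos hev, if_pos (show (((K - t) % 2 : Nat) : Int) = 0 by exact_mod_cast hev), hkK]
      · rw [if_neg hev, if_neg (show ¬ (((K - t) % 2 : Nat) : Int) = 0 by omega), hkK]
        exact ih K hqK (by omega) (by omega)

theorem pv_main (line : String) (pos1 : Int) (h0 : 0 ≤ pos1) :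
    parseStringComparison_py line pos1 = parseStringComparison_py_alt line pos1 := by
  simp only [parseStringComparison_py, parseStringComparison_py_alt]
  by_cases hbig : (line.toList.length : Int) < pos1
  · rw [pvALoop.eq_def, dif_neg (by omega), pv_findFrom_of_gt _ _ _ hbig]
    simp
  · obtain ⟨p, hp⟩ : ∃ p : Nat, pos1 = (p : Int) := ⟨pos1.toNat, by omega⟩
    subst hp
    have hpn : p ≤ line.toList.length := by exact_mod_cast not_lt.mp hbig
    by_cases hf : PySem.Chars.findFrom line.toList ['"'] (p : Int) none = -1
    · rw [hf]
      simp only [if_pos rfl]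
      exact pv_noq_false line.toList 0 p
        (pv_no_quote_of_not_infix line.toList p
          ((PySem.Chars.findFrom_natCast_eq_neg_one_iff line.toList ['"'] p hpn).mp hf))
    · rw [if_neg hf]
      obtain ⟨hle, hpre, hmin⟩ :=
        PySem.Chars.findFrom_natCast_spec line.toList ['"'] p hpn hf
      set r := PySem.Chars.findFrom line.toList ['"'] (p : Int) none with hrdef
      have hrnn : 0 ≤ r := le_trans (by positivity) hle
      set R := r.toNat with hRdef
      have hrR : r = (R : Int) := by omega
      have hqR : line.toList[R]? = some '"' := (pv_prefix_drop_iff line.toList '"' R).mp hpre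
      have hwalk := pv_walk_false line.toList 0 p R (by omega) hqR
        (fun i h1 h2 => fun hc => hmin i h1 h2 ((pv_prefix_drop_iff line.toList '"' i).mpr hc))
      rw [hwalk, hrR]
      exact pv_core line.toList R line.toList.length R hqR le_rfl (by omega)

-- ===== VERDICT (by name: the statement is the Claim_ definition above) =====
theorem parseStringComparison_py_spec : Claim_equal_parseStringComparison_py := by
  intro line pos1 _hd hpre
  unfold Spec_parseStringComparison_py
  exact pv_main line pos1 hpre
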